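-- pv_equiv track=rewrite | github.com/DhiaNeifar/my-leetcode-solutions | 2099 - Find Subsequence of Length K With the Largest Sum.py | maxSubsequence
-- ===== SOURCE A (Python) =====
-- from typing import List
--
-- def maxSubsequence(nums: List[int], k: int) -> List[int]:
--     ordered_result = sorted(nums)[len(nums) - k:]
--     result_dict = {}
--     for num in ordered_result:
--         result_dict[num] = result_dict.get(num, 0) + 1
--
--     result = []
--
--     for num in nums:
--         if num in result_dict and result_dict[num] > 0:
--             result.append(num)
--             result_dict[num] -= 1
--
--     return result
-- ===== SOURCE B (Python) =====
-- def _kth_largest(xs, j):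
--     # quickselect, 1-based j-th largest, requires 1 <= j <= len(xs); pivot = first element
--     pivot = xs[0]
--     gt = [v for v in xs if v > pivot]
--     if j <= len(gt):
--         return _kth_largest(gt, j)
--     eq_count = sum(1 for v in xs if v == pivot)
--     if j <= len(gt) + eq_count:
--         return pivot
--     return _kth_largest([v for v in xs if v < pivot], j - len(gt) - eq_count)
--
-- def maxSubsequence(nums, k):
--     # Quickselect (average O(n), no sort) finds the k-th largest value; one scan then keeps
--     # every element above it and the right number of copies of it, in original order.
--     if k <= 0:
--         return []
--     if len(nums) <= k:
--         return list(nums)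
--     t = _kth_largest(nums, k)
--     allowed = k - sum(1 for v in nums if v > t)
--     result = []
--     taken = 0
--     for v in nums:
--         if v > t:
--             result.append(v)
--         elif v == t and taken < allowed:
--             result.append(v)
--             taken += 1
--     return result
-- ===== Notes on version B (the rewrite author's own statement) =====
-- stated objective: alternative
-- what changed: B replaces A's sort + counter-dict reconstruction by quickselect: a recursive three-way-partition selection of the k-th largest value (no sorting anywhere, average-case O(n) selection), then a single order-preserving scan keeping elements above the threshold and the right number of copies of it with one integer counter instead of a dict of multiplicities.
-- intended difference: When len(nums) < k < 2*len(nums), A's slice start len(nums)-k is negative and wraps around so A returns only the 2*len(nums)-k largest elements, while B returns all of nums, the intended k-largest subsequence when k exceeds the length. — e.g. on maxSubsequence([1, 2], 3): A returns [2], B returns [1, 2]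
import Mathlib
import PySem

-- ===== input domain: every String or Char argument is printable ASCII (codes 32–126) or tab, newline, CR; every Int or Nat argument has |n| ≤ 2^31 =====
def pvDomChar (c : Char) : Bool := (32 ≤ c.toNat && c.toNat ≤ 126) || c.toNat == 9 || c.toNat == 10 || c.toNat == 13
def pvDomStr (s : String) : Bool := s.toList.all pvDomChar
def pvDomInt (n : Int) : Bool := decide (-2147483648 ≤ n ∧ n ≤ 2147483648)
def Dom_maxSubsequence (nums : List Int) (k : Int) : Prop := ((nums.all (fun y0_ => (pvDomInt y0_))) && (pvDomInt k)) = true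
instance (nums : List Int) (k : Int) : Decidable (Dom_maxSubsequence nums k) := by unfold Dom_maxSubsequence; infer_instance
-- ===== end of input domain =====

-- B replaces A's sort + counter-dict reconstruction by quickselect: a recursive
-- three-way-partition selection of the k-th largest value (no sort anywhere), then one
-- scan keeping elements above it and the right number of copies of it, in original order.

-- ===== PORT A =====
def maxSubsequence (nums : List Int) (k : Int) : List Int :=
  let ordered_result :=
    PySem.List.slice (PySem.List.sorted nums (fun x => x) false)
      (some ((nums.length : Int) - k)) none
  let result_dict :=
    ordered_result.foldl (fun (d : PySem.Dict Int Int) num => d.insert num (d.getD num 0 + 1))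
      PySem.Dict.empty
  let p :=
    nums.foldl (fun (st : PySem.Dict Int Int × List Int) num =>
      if st.1.contains num && decide (0 < st.1.getD num 0) then
        (st.1.insert num (st.1.getD num 0 - 1), st.2 ++ [num])
      else st) (result_dict, [])
  p.2

-- ===== PORT B =====
/-- Quickselect (pivot = first element): 1-based `j`-th largest of `xs`.
The `[]` case is unreachable — Python's `xs[0]` would raise there; every call
(from `maxSubsequence_alt` and recursively) keeps `1 ≤ j ≤ xs.length`. -/
def kthLargest (xs : List Int) (j : Int) : Int :=
  match xs with
  | [] => 0
  | x :: rest =>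
    let gt := (x :: rest).filter (fun v => decide (x < v))
    if j ≤ (gt.length : Int) then kthLargest gt j
    else
      let eqc := (x :: rest).countP (fun v => decide (v = x))
      if j ≤ (gt.length : Int) + (eqc : Int) then x
      else kthLargest ((x :: rest).filter (fun v => decide (v < x))) (j - gt.length - eqc)
termination_by xs.length
decreasing_by
  · simpa [List.filter_cons] using Nat.lt_succ_of_le (List.length_filter_le _ rest)
  · simpa [List.filter_cons] using Nat.lt_succ_of_le (List.length_filter_le _ rest)

def maxSubsequence_alt (nums : List Int) (k : Int) : List Int :=
  if k ≤ 0 then []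
  else if (nums.length : Int) ≤ k then nums
  else
    let t := kthLargest nums k
    -- `allowed` is a Python int; in this branch it is the positive multiplicity of the
    -- threshold among the top k, so the Nat representation is exact
    let allowed := (k - (nums.countP (fun v => decide (t < v)) : Int)).toNat
    (nums.foldl (fun (st : List Int × Nat) v =>
      if t < v then (st.1 ++ [v], st.2)
      else if v = t ∧ st.2 < allowed then (st.1 ++ [v], st.2 + 1)
      else st) ([], 0)).1

-- ===== PRECONDITION & SPEC =====
-- When nums.length < k < 2*nums.length, A's slice start len(nums)-k is negative and wraps
-- around, so A returns only the 2*len-k largest elements; B returns all of nums (every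
-- element is among the k largest), which is the intended "subsequence of length min(k,len)".
def D_maxSubsequence (nums : List Int) (k : Int) : Prop :=
  (nums.length : Int) < k ∧ k < 2 * (nums.length : Int)
instance (nums : List Int) (k : Int) : Decidable (D_maxSubsequence nums k) := by
  unfold D_maxSubsequence; infer_instance

def Spec_maxSubsequence (nums : List Int) (k : Int) (out : List Int) : Prop :=
  ¬ D_maxSubsequence nums k → out = maxSubsequence_alt nums k
instance (nums : List Int) (k : Int) (out : List Int) : Decidable (Spec_maxSubsequence nums k out) := by
  unfold Spec_maxSubsequence; infer_instance

def pvDiffWitness_maxSubsequence : List Int × Int := ([1, 2], 3)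
def pvDiffWitnessOut_maxSubsequence : (List Int) × (List Int) := ([2], [1, 2])

-- ===== CLAIM (what is proved, stated in full; the proofs are below) =====
def Claim_unchanged_maxSubsequence : Prop := ∀ (nums : List Int) (k : Int), Dom_maxSubsequence nums k → Spec_maxSubsequence nums k (maxSubsequence nums k)
def Claim_changed_maxSubsequence : Prop := Dom_maxSubsequence (pvDiffWitness_maxSubsequence.1) (pvDiffWitness_maxSubsequence.2) ∧ D_maxSubsequence (pvDiffWitness_maxSubsequence.1) (pvDiffWitness_maxSubsequence.2) ∧ maxSubsequence (pvDiffWitness_maxSubsequence.1) (pvDiffWitness_maxSubsequence.2) = pvDiffWitnessOut_maxSubsequence.1 ∧ maxSubsequence_alt (pvDiffWitness_maxSubsequence.1) (pvDiffWitness_maxSubsequence.2) = pvDiffWitnessOut_maxSubsequence.2 ∧ pvDiffWitnessOut_maxSubsequence.1 ≠ pvDiffWitnessOut_maxSubsequence.2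
def Claim_exact_maxSubsequence : Prop := ∀ (nums : List Int) (k : Int), Dom_maxSubsequence nums k → D_maxSubsequence nums k → maxSubsequence nums k ≠ maxSubsequence_alt nums k

-- ===== LEMMAS AND PROOFS =====

/-- Reference selector: keep each element `x` of `rest` iff the number of equal elements
already seen is below the allowance `cnt x`. -/
def pvSel (cnt : Int → Nat) : List Int → List Int → List Int
  | _, [] => []
  | seen, x :: rest =>
    if seen.count x < cnt x then x :: pvSel cnt (seen ++ [x]) rest
    else pvSel cnt (seen ++ [x]) rest

/-- A's allowance: multiplicity in the top slice. -/
def pvCntA (nums : List Int) (k : Int) (v : Int) : Nat :=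
  (PySem.List.slice (PySem.List.sorted nums (fun x => x) false)
      (some ((nums.length : Int) - k)) none).count v

theorem pvScanA (cnt : Int → Nat) :
    ∀ (rest : List Int) (d : PySem.Dict Int Int) (seen acc : List Int),
      (∀ v, d.contains v = decide (0 < cnt v)) →
      (∀ v, d.getD v 0 = (cnt v : Int) - (min (seen.count v) (cnt v) : Nat)) →
      (rest.foldl (fun (st : PySem.Dict Int Int × List Int) num =>
        if st.1.contains num && decide (0 < st.1.getD num 0) then
          (st.1.insert num (st.1.getD num 0 - 1), st.2 ++ [num])
        else st) (d, acc)).2 = acc ++ pvSel cnt seen rest := by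
  intro rest
  induction rest with
  | nil => intro d seen acc _ _; simp [pvSel]
  | cons x rest ih =>
    intro d seen acc hc hg
    have hcx := hc x
    have hgx := hg x
    have hcount_app_self : (seen ++ [x]).count x = seen.count x + 1 := by
      simp [List.count_append]
    have hcount_app_ne : ∀ v, v ≠ x → (seen ++ [x]).count v = seen.count v := by
      intro v hv
      simp [List.count_append, List.count_singleton]
      intro h; exact absurd h.symm hv
    by_cases hkeep : seen.count x < cnt x
    · have htest : (d.contains x && decide (0 < d.getD x 0)) = true := by
        rw [hcx, hgx]
        have h0 : 0 < cnt x := by omega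
        have hmin : min (seen.count x) (cnt x) = seen.count x := by omega
        rw [hmin]
        simp only [Bool.and_eq_true, decide_eq_true_eq]
        exact ⟨h0, by omega⟩
      simp only [List.foldl_cons, htest, if_true]
      rw [ih (d.insert x (d.getD x 0 - 1)) (seen ++ [x]) (acc ++ [x])]
      · simp [pvSel, hkeep]
      · intro v
        rw [PySem.Dict.contains_insert]
        by_cases hv : v = x
        · rw [hv, hcx]
          have h0 : 0 < cnt x := by omega
          simp [h0]
        · rw [hc v]
          have : (v == x) = false := by simp [hv]
          rw [this, Bool.false_or]
      · intro v
        rw [PySem.Dict.getD_insert]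
        by_cases hv : v = x
        · rw [if_pos hv, hv, hgx]
          have h1 : min (seen.count x) (cnt x) = seen.count x := by omega
          have h2 : min ((seen ++ [x]).count x) (cnt x) = seen.count x + 1 := by
            rw [hcount_app_self]; omega
          rw [h1, h2]; push_cast; ring
        · rw [if_neg hv, hg v, hcount_app_ne v hv]
    · have htest : (d.contains x && decide (0 < d.getD x 0)) = false := by
        rw [hcx, hgx]
        by_cases h0 : 0 < cnt x
        · have hmin : min (seen.count x) (cnt x) = cnt x := by omega
          rw [hmin]
          simp only [Bool.and_eq_false_iff, decide_eq_false_iff_not]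
          right; omega
        · simp only [Bool.and_eq_false_iff, decide_eq_false_iff_not]
          left; exact h0
      simp only [List.foldl_cons, htest, Bool.false_eq_true, if_false]
      rw [ih d (seen ++ [x]) acc hc]
      · simp [pvSel, hkeep]
      · intro v
        rw [hg v]
        by_cases hv : v = x
        · rw [hv, hcount_app_self]
          have : min (seen.count x + 1) (cnt x) = min (seen.count x) (cnt x) := by omega
          rw [this]
        · rw [hcount_app_ne v hv]

theorem pvA_eq_sel (nums : List Int) (k : Int) :
    maxSubsequence nums k = pvSel (pvCntA nums k) [] nums := by
  unfold maxSubsequence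
  simp only []
  rw [PySem.Dict.foldl_insert_getD_add_one_eq_counter]
  rw [pvScanA (pvCntA nums k) nums _ [] []]
  · simp
  · intro v
    rw [PySem.Dict.contains_counter]
    unfold pvCntA
    rcases Nat.eq_zero_or_pos ((PySem.List.slice (PySem.List.sorted nums (fun x => x) false)
        (some ((nums.length : Int) - k)) none).count v) with h | h
    · rw [h]
      simp [List.count_eq_zero] at h ⊢
      simpa using h
    · have hm : v ∈ PySem.List.slice (PySem.List.sorted nums (fun x => x) false)
        (some ((nums.length : Int) - k)) none := by
        rw [← List.count_pos_iff]; exact h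
      have h1 : (PySem.List.slice (PySem.List.sorted nums (fun x => x) false)
          (some ((nums.length : Int) - k)) none).contains v = true := by
        simpa using hm
      rw [h1]
      symm
      simpa using h
  · intro v
    rw [PySem.Dict.getD_counter]
    simp [pvCntA]

/-- B's scan allowance: everything above the threshold is kept, exactly `allowed` copies of
the threshold are kept, nothing below it is kept. -/
def pvCntT (nums : List Int) (t : Int) (allowed : Nat) (v : Int) : Nat :=
  if t < v then nums.count v else if v = t then allowed else 0

theorem pvScanBloop (nums : List Int) (t : Int) (allowed : Nat) :
    ∀ (rest seen acc : List Int) (taken : Nat),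
      nums = seen ++ rest → taken = min (seen.count t) allowed →
      (rest.foldl (fun (st : List Int × Nat) v =>
        if t < v then (st.1 ++ [v], st.2)
        else if v = t ∧ st.2 < allowed then (st.1 ++ [v], st.2 + 1)
        else st) (acc, taken)).1 = acc ++ pvSel (pvCntT nums t allowed) seen rest := by
  intro rest
  induction rest with
  | nil => intro seen acc taken _ _; simp [pvSel]
  | cons x rest ih =>
    intro seen acc taken hsplit htaken
    have hx_cnt : seen.count x < nums.count x := by
      rw [hsplit, List.count_append, List.count_cons]
      simp
    have hnext : nums = (seen ++ [x]) ++ rest := by simpa using hsplit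
    rw [List.foldl_cons]
    by_cases h1 : t < x
    · have hkeep : seen.count x < pvCntT nums t allowed x := by
        unfold pvCntT; rw [if_pos h1]; exact hx_cnt
      rw [if_pos h1]
      rw [ih (seen ++ [x]) (acc ++ [x]) taken hnext ?_]
      · simp [pvSel, hkeep]
      · rw [htaken]
        have : (seen ++ [x]).count t = seen.count t := by
          simp [List.count_append, List.count_singleton]
          omega
        rw [this]
    · rw [if_neg h1]
      by_cases h2 : x = t
      · subst h2
        have hc_eq : pvCntT nums x allowed x = allowed := by
          unfold pvCntT; rw [if_neg h1, if_pos rfl]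
        have hcnt_app : (seen ++ [x]).count x = seen.count x + 1 := by
          simp [List.count_append]
        by_cases h3 : seen.count x < allowed
        · have : taken < allowed := by omega
          rw [if_pos ⟨rfl, this⟩]
          rw [ih (seen ++ [x]) (acc ++ [x]) (taken + 1) hnext ?_]
          · have : seen.count x < pvCntT nums x allowed x := by rw [hc_eq]; exact h3
            simp [pvSel, this]
          · rw [hcnt_app]; omega
        · have : ¬ (x = x ∧ taken < allowed) := by
            rintro ⟨-, hlt⟩; omega
          rw [if_neg this]
          rw [ih (seen ++ [x]) acc taken hnext ?_]
          · have : ¬ seen.count x < pvCntT nums x allowed x := by rw [hc_eq]; exact h3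
            simp [pvSel, this]
          · rw [hcnt_app]; omega
      · have : ¬ (x = t ∧ taken < allowed) := by rintro ⟨h, -⟩; exact h2 h
        rw [if_neg this]
        rw [ih (seen ++ [x]) acc taken hnext ?_]
        · have : ¬ seen.count x < pvCntT nums t allowed x := by
            unfold pvCntT; rw [if_neg h1, if_neg h2]; omega
          simp [pvSel, this]
        · rw [htaken]
          have : (seen ++ [x]).count t = seen.count t := by
            simp [List.count_append, List.count_singleton]
            intro h; exact absurd h h2
          rw [this]

theorem pvB_eval (nums : List Int) (k : Int) (h0 : ¬ k ≤ 0) (hn : ¬ (nums.length : Int) ≤ k) :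
    maxSubsequence_alt nums k =
      pvSel (pvCntT nums (kthLargest nums k)
        ((k - (nums.countP (fun v => decide (kthLargest nums k < v)) : Int)).toNat)) [] nums := by
  unfold maxSubsequence_alt
  rw [if_neg h0, if_neg hn]
  exact pvScanBloop nums _ _ nums [] [] 0 (by simp) (by simp)

-- ===== quickselect correctness =====

/-- If `q` only holds above `x`, counting `q` ignores the `≤ x` part. -/
theorem pv_countP_subset (x : Int) (q : Int → Bool)
    (hq : ∀ v : Int, q v = true → x < v) (l : List Int) :
    l.countP q = (l.filter (fun v => decide (x < v))).countP q := by
  induction l with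
  | nil => simp
  | cons a l ih =>
    simp only [List.countP_cons, List.filter_cons]
    by_cases h : x < a
    · simp [h, ih, List.countP_cons]
    · have hqa : q a = false := by
        cases hqa : q a
        · rfl
        · exact absurd (hq a hqa) h
      simp [h, hqa, ih]

/-- If `q` holds on everything `≥ x`, counting `q` splits along the three-way partition. -/
theorem pv_countP_restrict (x : Int) (q : Int → Bool)
    (hq : ∀ v : Int, ¬ v < x → q v = true) (l : List Int) :
    l.countP q = (l.filter (fun v => decide (v < x))).countP q
      + l.countP (fun v => decide (x < v)) + l.countP (fun v => decide (v = x)) := by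
  induction l with
  | nil => simp
  | cons a l ih =>
    simp only [List.countP_cons, List.filter_cons]
    by_cases h : a < x
    · have h1 : decide (x < a) = false := by simp; omega
      have h2 : decide (a = x) = false := by simp; omega
      simp [h, h1, h2, ih, List.countP_cons]
      omega
    · have hqa : q a = true := hq a h
      rcases eq_or_lt_of_le (not_lt.mp h) with he | hlt
      · have h1 : decide (x < a) = false := by simp; omega
        have h2 : decide (a = x) = true := by simp; omega
        simp [h, hqa, h1, h2, ih]
        omega
      · have h1 : decide (x < a) = true := by simp; omega
        have h2 : decide (a = x) = false := by simp; omega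
        simp [h, hqa, h1, h2, ih]
        omega

theorem pv_count_trichotomy (x : Int) (l : List Int) :
    l.countP (fun v => decide (v < x)) + l.countP (fun v => decide (x < v))
      + l.countP (fun v => decide (v = x)) = l.length := by
  induction l with
  | nil => simp
  | cons a l ih =>
    simp only [List.countP_cons, List.length_cons]
    rcases lt_trichotomy a x with h | h | h
    · have h1 : decide (a < x) = true := by simp [h]
      have h2 : decide (x < a) = false := by simp; omega
      have h3 : decide (a = x) = false := by simp; omega
      simp [h1, h2, h3]; omega
    · have h1 : decide (a < x) = false := by simp; omega
      have h2 : decide (x < a) = false := by simp; omega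
      have h3 : decide (a = x) = true := by simp [h]
      simp [h1, h2, h3]; omega
    · have h1 : decide (a < x) = false := by simp; omega
      have h2 : decide (x < a) = true := by simp [h]
      have h3 : decide (a = x) = false := by simp; omega
      simp [h1, h2, h3]; omega

/-- Quickselect returns an element of the list whose strict-upper count is `< j` and whose
weak-upper count is `≥ j` — i.e. it is the `j`-th largest value. -/
theorem kth_spec_fuel (n : Nat) : ∀ (xs : List Int) (j : Int), xs.length ≤ n →
    1 ≤ j → j ≤ (xs.length : Int) →
    kthLargest xs j ∈ xs ∧
      ((xs.countP (fun v => decide (kthLargest xs j < v)) : Int) < j ∧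
       j ≤ (xs.countP (fun v => decide (kthLargest xs j ≤ v)) : Int)) := by
  induction n with
  | zero =>
    intro xs j hn h1 h2
    interval_cases h : xs.length
    · simp at h2; omega
  | succ n ihn =>
    intro xs j hn h1 h2
    match xs with
    | [] => simp at h2; omega
    | x :: rest =>
      have hglt : ((x :: rest).filter (fun v => decide (x < v))).length < (x :: rest).length := by
        simpa [List.filter_cons] using Nat.lt_succ_of_le (List.length_filter_le _ rest)
      have hllt : ((x :: rest).filter (fun v => decide (v < x))).length < (x :: rest).length := by
        simpa [List.filter_cons] using Nat.lt_succ_of_le (List.length_filter_le _ rest)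
      have hlen1 : (x :: rest).length = rest.length + 1 := by simp
      rw [kthLargest]
      simp only [List.length_cons] at hn
      by_cases hle : j ≤ (((x :: rest).filter (fun v => decide (x < v))).length : Int)
      · rw [if_pos hle]
        obtain ⟨hmem, hcGT, hcGE⟩ := ihn ((x :: rest).filter (fun v => decide (x < v))) j
          (by omega) h1 hle
        set t := kthLargest ((x :: rest).filter (fun v => decide (x < v))) j with htdef
        have hxt : x < t := by
          have := List.of_mem_filter hmem
          simpa using this
        refine ⟨List.mem_of_mem_filter hmem, ?_, ?_⟩
        · rw [pv_countP_subset x (fun v => decide (t < v))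
            (by intro v hv; simp at hv; omega) (x :: rest)]
          exact hcGT
        · rw [pv_countP_subset x (fun v => decide (t ≤ v))
            (by intro v hv; simp at hv; omega) (x :: rest)]
          exact hcGE
      · rw [if_neg hle]
        by_cases hle2 : j ≤ (((x :: rest).filter (fun v => decide (x < v))).length : Int)
            + ((x :: rest).countP (fun v => decide (v = x)) : Int)
        · rw [if_pos hle2]
          have hGf : (x :: rest).countP (fun v => decide (x < v))
              = ((x :: rest).filter (fun v => decide (x < v))).length :=
            List.countP_eq_length_filter
          refine ⟨List.mem_cons_self, ?_, ?_⟩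
          · rw [hGf]
            omega
          · have hsplit := pv_countP_restrict x (fun v => decide (x ≤ v))
              (by intro v hv; simp; omega) (x :: rest)
            have hzero : (((x :: rest).filter (fun v => decide (v < x))).countP
                (fun v => decide (x ≤ v))) = 0 := by
              rw [List.countP_eq_zero]
              intro a ha
              have := List.of_mem_filter ha
              simp at this ⊢
              omega
            rw [hsplit, hzero, hGf]
            push_cast
            omega
        · rw [if_neg hle2]
          have htri := pv_count_trichotomy x (x :: rest)
          have hGf : (x :: rest).countP (fun v => decide (x < v))
              = ((x :: rest).filter (fun v => decide (x < v))).length :=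
            List.countP_eq_length_filter
          have hLf : (x :: rest).countP (fun v => decide (v < x))
              = ((x :: rest).filter (fun v => decide (v < x))).length :=
            List.countP_eq_length_filter
          rw [hGf, hLf] at htri
          have hj1 : 1 ≤ j - (((x :: rest).filter (fun v => decide (x < v))).length : Int)
              - ((x :: rest).countP (fun v => decide (v = x)) : Int) := by omega
          have hj2 : j - (((x :: rest).filter (fun v => decide (x < v))).length : Int)
              - ((x :: rest).countP (fun v => decide (v = x)) : Int)
              ≤ (((x :: rest).filter (fun v => decide (v < x))).length : Int) := by
            simp only [List.length_cons] at h2 htri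
            omega
          obtain ⟨hmem, hcGT, hcGE⟩ := ihn ((x :: rest).filter (fun v => decide (v < x))) _
            (by omega) hj1 hj2
          set t := kthLargest ((x :: rest).filter (fun v => decide (v < x)))
            (j - (((x :: rest).filter (fun v => decide (x < v))).length : Int)
              - ((x :: rest).countP (fun v => decide (v = x)) : Int)) with htdef
          have htx : t < x := by
            have := List.of_mem_filter hmem
            simpa using this
          refine ⟨List.mem_of_mem_filter hmem, ?_, ?_⟩
          · have hr := pv_countP_restrict x (fun v => decide (t < v))
              (by intro v hv; simp; omega) (x :: rest)
            rw [hGf] at hr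
            rw [hr]
            push_cast
            omega
          · have hr := pv_countP_restrict x (fun v => decide (t ≤ v))
              (by intro v hv; simp; omega) (x :: rest)
            rw [hGf] at hr
            rw [hr]
            push_cast
            omega

theorem kth_spec (xs : List Int) (j : Int) (h1 : 1 ≤ j) (h2 : j ≤ (xs.length : Int)) :
    kthLargest xs j ∈ xs ∧
      ((xs.countP (fun v => decide (kthLargest xs j < v)) : Int) < j ∧
       j ≤ (xs.countP (fun v => decide (kthLargest xs j ≤ v)) : Int)) :=
  kth_spec_fuel xs.length xs j le_rfl h1 h2

theorem pv_count_eq_countP (t : Int) (l : List Int) :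
    l.count t = l.countP (fun v => decide (v = t)) := by
  induction l with
  | nil => simp
  | cons a l ih =>
    by_cases h : a = t <;> simp [ih, h]

theorem pvCntA_drop (nums : List Int) (k : Int) (v : Int) :
    pvCntA nums k v =
      ((PySem.List.sorted nums (fun x => x) false).drop
        (PySem.List.clampIdx nums.length ((nums.length : Int) - k))).count v := by
  unfold pvCntA
  rw [PySem.List.slice_some_none, PySem.List.length_sorted]

theorem pvSel_eq_nil (c : Int → Nat) (hc : ∀ x, c x = 0) :
    ∀ (rest seen : List Int), pvSel c seen rest = [] := by
  intro rest
  induction rest with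
  | nil => intro seen; simp [pvSel]
  | cons x rest ih =>
    intro seen
    have : ¬ seen.count x < c x := by rw [hc x]; omega
    simp [pvSel, this, ih]

theorem pvSel_eq_self (nums : List Int) (c : Int → Nat)
    (h : ∀ (x : Int) (e : Nat), e < nums.count x → e < c x) :
    ∀ (rest seen : List Int), nums = seen ++ rest → pvSel c seen rest = rest := by
  intro rest
  induction rest with
  | nil => intro seen _; simp [pvSel]
  | cons x rest ih =>
    intro seen hsplit
    have he : seen.count x < nums.count x := by
      rw [hsplit, List.count_append, List.count_cons]
      simp
    have hnext : nums = (seen ++ [x]) ++ rest := by simpa using hsplit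
    simp [pvSel, h x _ he, ih (seen ++ [x]) hnext]

theorem pvSel_length_le (c : Int → Nat) :
    ∀ (rest seen : List Int), (pvSel c seen rest).length ≤ rest.length := by
  intro rest
  induction rest with
  | nil => intro seen; simp [pvSel]
  | cons x rest ih =>
    intro seen
    by_cases hkeep : seen.count x < c x
    · simp only [pvSel, if_pos hkeep, List.length_cons]
      exact Nat.succ_le_succ (ih (seen ++ [x]))
    · simp only [pvSel, if_neg hkeep, List.length_cons]
      exact Nat.le_succ_of_le (ih (seen ++ [x]))

/-- If the selector returns its whole input, every value's full multiplicity fits in its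
allowance. -/
theorem pvSel_self_bound (c : Int → Nat) :
    ∀ (rest seen : List Int), pvSel c seen rest = rest →
      ∀ x ∈ rest, seen.count x + rest.count x ≤ c x := by
  intro rest
  induction rest with
  | nil => intro seen _ x hx; simp at hx
  | cons y rest ih =>
    intro seen heq x hx
    by_cases hkeep : seen.count y < c y
    · simp only [pvSel, if_pos hkeep, List.cons.injEq, true_and] at heq
      by_cases hxr : x ∈ rest
      · have := ih (seen ++ [y]) heq x hxr
        rw [List.count_append, List.count_singleton] at this
        rw [List.count_cons]
        by_cases hxy : x = y <;> simp [hxy] at this ⊢ <;> omega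
      · have hxy : x = y := by
          rcases List.mem_cons.mp hx with h | h
          · exact h
          · exact absurd h hxr
        subst hxy
        have : rest.count x = 0 := List.count_eq_zero.mpr hxr
        rw [List.count_cons, this]
        simp
        omega
    · exfalso
      simp only [pvSel, if_neg hkeep] at heq
      have hle := pvSel_length_le c rest (seen ++ [y])
      rw [heq] at hle
      simp at hle

/-- Elements of a sorted prefix `take (n+1)` are at most the `n`-th element. -/
theorem pv_sorted_take_le (s : List Int) (hpair : s.Pairwise (· ≤ ·)) (n : Nat)
    (hn : n < s.length) : ∀ y ∈ s.take (n + 1), y ≤ s[n] := by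
  intro y hy
  obtain ⟨i, hi, rfl⟩ := List.mem_iff_getElem.mp hy
  have hi' : i < n + 1 := lt_of_lt_of_le hi (by simp [List.length_take])
  have hilen : i < s.length := by omega
  rw [List.getElem_take]
  rcases Nat.lt_or_ge i n with h | h
  · exact (List.pairwise_iff_getElem.mp hpair) i n hilen hn h
  · have : i = n := by omega
    subst this
    exact le_refl _

/-- Elements of a sorted suffix `drop n` are at least the `n`-th element. -/
theorem pv_sorted_drop_ge (s : List Int) (hpair : s.Pairwise (· ≤ ·)) (n : Nat)
    (hn : n < s.length) : ∀ y ∈ s.drop n, s[n] ≤ y := by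
  intro y hy
  obtain ⟨i, hi, rfl⟩ := List.mem_iff_getElem.mp hy
  have hlen : i < s.length - n := by simpa [List.length_drop] using hi
  rw [List.getElem_drop]
  rcases Nat.eq_zero_or_pos i with h | h
  · subst h; simp
  · exact (List.pairwise_iff_getElem.mp hpair) n (n + i) hn (by omega) (by omega)

-- ===== case k ≤ 0 =====
theorem pv_low (nums : List Int) (k : Int) (hk : k ≤ 0) :
    maxSubsequence nums k = maxSubsequence_alt nums k := by
  have hB : maxSubsequence_alt nums k = [] := by
    unfold maxSubsequence_alt; rw [if_pos hk]
  rw [hB, pvA_eq_sel]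
  apply pvSel_eq_nil
  intro v
  rw [pvCntA_drop]
  have hm : PySem.List.clampIdx nums.length ((nums.length : Int) - k) = nums.length := by
    unfold PySem.List.clampIdx; split_ifs <;> omega
  rw [hm, ← PySem.List.length_sorted nums (fun x => x) false, List.drop_length]
  simp

-- ===== case nums.length ≤ k (outside D_: k = len or k ≥ 2*len) =====
theorem pv_high (nums : List Int) (k : Int) (hD : ¬ D_maxSubsequence nums k)
    (h0 : ¬ k ≤ 0) (hk : (nums.length : Int) ≤ k) :
    maxSubsequence nums k = maxSubsequence_alt nums k := by
  unfold D_maxSubsequence at hD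
  have hB : maxSubsequence_alt nums k = nums := by
    unfold maxSubsequence_alt; rw [if_neg h0, if_pos hk]
  have hm : PySem.List.clampIdx nums.length ((nums.length : Int) - k) = 0 := by
    unfold PySem.List.clampIdx; split_ifs <;> omega
  have hperm : (PySem.List.sorted nums (fun x => x) false).Perm nums :=
    PySem.List.sorted_perm nums (fun x => x) false
  rw [hB, pvA_eq_sel]
  apply pvSel_eq_self nums _ _ nums [] (by simp)
  intro x e he
  rw [pvCntA_drop, hm, List.drop_zero, hperm.count_eq]
  exact he

-- ===== case 0 < k < nums.length =====
theorem pv_mid (nums : List Int) (k : Int) (h0 : ¬ k ≤ 0) (hk : ¬ (nums.length : Int) ≤ k) :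
    maxSubsequence nums k = maxSubsequence_alt nums k := by
  rw [pvB_eval nums k h0 hk, pvA_eq_sel]
  set t := kthLargest nums k with htdef
  obtain ⟨htmem, hcGT, hcGE⟩ := kth_spec nums k (by omega) (by omega)
  set s := PySem.List.sorted nums (fun x => x) false with hs
  have hslen : s.length = nums.length := PySem.List.length_sorted nums (fun x => x) false
  have hperm : s.Perm nums := PySem.List.sorted_perm nums (fun x => x) false
  have hpair : s.Pairwise (· ≤ ·) := PySem.List.sorted_pairwise nums (fun x => x)
  have hkpos : 1 ≤ k.toNat := by omega
  have hklen : k.toNat < nums.length := by omega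
  set m := nums.length - k.toNat with hmdef
  have hm_lt_s : m < s.length := by omega
  -- transfer counts to the sorted copy
  have hGTs : nums.countP (fun v => decide (t < v)) = s.countP (fun v => decide (t < v)) :=
    (hperm.countP_eq _).symm
  have hGEs : nums.countP (fun v => decide (t ≤ v)) = s.countP (fun v => decide (t ≤ v)) :=
    (hperm.countP_eq _).symm
  -- the threshold is s[m]
  have hsm : s[m]'hm_lt_s = t := by
    rcases lt_trichotomy (s[m]'hm_lt_s) t with h | h | h
    · exfalso
      have hsplit : s.countP (fun v => decide (t ≤ v)) =
          (s.take (m + 1)).countP (fun v => decide (t ≤ v))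
            + (s.drop (m + 1)).countP (fun v => decide (t ≤ v)) := by
        rw [← List.countP_append, List.take_append_drop]
      have hz : (s.take (m + 1)).countP (fun v => decide (t ≤ v)) = 0 := by
        rw [List.countP_eq_zero]
        intro a ha
        have := pv_sorted_take_le s hpair m hm_lt_s a ha
        simp
        omega
      have hdl : (s.drop (m + 1)).length = s.length - (m + 1) := List.length_drop
      have hle2 : (s.drop (m + 1)).countP (fun v => decide (t ≤ v)) ≤ s.length - (m + 1) := by
        have : (s.drop (m + 1)).countP (fun v => decide (t ≤ v)) ≤ (s.drop (m + 1)).length :=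
          List.countP_le_length
        omega
      rw [hGEs, hsplit, hz] at hcGE
      omega
    · exact h
    · exfalso
      have hall : (s.drop m).countP (fun v => decide (t < v)) = (s.drop m).length := by
        rw [List.countP_eq_length]
        intro a ha
        have := pv_sorted_drop_ge s hpair m hm_lt_s a ha
        simp
        omega
      have hsplit : s.countP (fun v => decide (t < v)) =
          (s.take m).countP (fun v => decide (t < v))
            + (s.drop m).countP (fun v => decide (t < v)) := by
        rw [← List.countP_append, List.take_append_drop]
      have hdl : (s.drop m).length = s.length - m := List.length_drop
      rw [hGTs, hsplit, hall, hdl] at hcGT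
      omega
  -- count of the threshold value in the top slice
  have htake_le : ∀ y ∈ s.take m, y ≤ t := by
    intro y hy
    obtain ⟨i, hi, rfl⟩ := List.mem_iff_getElem.mp hy
    have hi' : i < m := by
      simp [List.length_take] at hi
      omega
    rw [List.getElem_take]
    exact hsm ▸ (List.pairwise_iff_getElem.mp hpair) i m (by omega) hm_lt_s hi' 
  have hdrop_ge : ∀ y ∈ s.drop m, t ≤ y := fun y hy =>
    hsm ▸ pv_sorted_drop_ge s hpair m hm_lt_s y hy
  have hdropP_len : (s.drop m).length = k.toNat := by
    rw [List.length_drop]; omega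
  have hdropGT : (s.drop m).countP (fun v => decide (t < v))
      + (s.drop m).count t = k.toNat := by
    have hr := pv_countP_restrict t (fun v => decide (t ≤ v))
      (by intro v hv; simp; omega) (s.drop m)
    have hz : ((s.drop m).filter (fun v => decide (v < t))).countP
        (fun v => decide (t ≤ v)) = 0 := by
      rw [List.countP_eq_zero]
      intro a ha
      have := List.of_mem_filter ha
      simp at this ⊢
      omega
    have hfull : (s.drop m).countP (fun v => decide (t ≤ v)) = (s.drop m).length := by
      rw [List.countP_eq_length]
      intro a ha
      have := hdrop_ge a ha
      simpa using this
    rw [hz, hfull, hdropP_len] at hr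
    rw [pv_count_eq_countP]
    omega
  have htakeGT : (s.take m).countP (fun v => decide (t < v)) = 0 := by
    rw [List.countP_eq_zero]
    intro a ha
    have := htake_le a ha
    simp
    omega
  have hGT_val : s.countP (fun v => decide (t < v)) = k.toNat - (s.drop m).count t := by
    have hsplit : s.countP (fun v => decide (t < v)) =
        (s.take m).countP (fun v => decide (t < v))
          + (s.drop m).countP (fun v => decide (t < v)) := by
      rw [← List.countP_append, List.take_append_drop]
    omega
  have hcnt_le : (s.drop m).count t ≤ k.toNat := by
    have : (s.drop m).count t ≤ (s.drop m).length := List.count_le_length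
    omega
  have hallowed : (k - (nums.countP (fun v => decide (t < v)) : Int)).toNat
      = (s.drop m).count t := by
    rw [hGTs, hGT_val]
    omega
  -- A's slice is drop m
  have hclamp : PySem.List.clampIdx nums.length ((nums.length : Int) - k) = m := by
    unfold PySem.List.clampIdx; split_ifs <;> omega
  -- the two allowance functions agree
  have hfun : pvCntA nums k = pvCntT nums t
      ((k - (nums.countP (fun v => decide (t < v)) : Int)).toNat) := by
    funext v
    rw [pvCntA_drop, hclamp, ← hs, hallowed]
    unfold pvCntT
    by_cases h1 : t < v
    · rw [if_pos h1]
      have htake0 : (s.take m).count v = 0 := by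
        rw [List.count_eq_zero]
        intro hmem
        have := htake_le v hmem
        omega
      have hsumc : s.count v = (s.take m).count v + (s.drop m).count v := by
        rw [← List.count_append, List.take_append_drop]
      rw [← hperm.count_eq v]
      omega
    · by_cases h2 : v = t
      · rw [if_neg h1, if_pos h2, h2]
      · rw [if_neg h1, if_neg h2]
        rw [List.count_eq_zero]
        intro hmem
        have := hdrop_ge v hmem
        exact h2 (by omega)
  rw [hfun]

theorem pv_unchanged (nums : List Int) (k : Int) (hD : ¬ D_maxSubsequence nums k) :
    maxSubsequence nums k = maxSubsequence_alt nums k := by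
  by_cases h0 : k ≤ 0
  · exact pv_low nums k h0
  · by_cases hk : (nums.length : Int) ≤ k
    · exact pv_high nums k hD h0 hk
    · exact pv_mid nums k h0 hk

-- ===== VERDICT (by name: the statement is the Claim_ definition above) =====
theorem maxSubsequence_spec : Claim_unchanged_maxSubsequence := by
  intro nums k _ hD
  exact pv_unchanged nums k hD

theorem maxSubsequence_changed : Claim_changed_maxSubsequence := by
  unfold Claim_changed_maxSubsequence; decide

theorem maxSubsequence_tight : Claim_exact_maxSubsequence := by
  unfold Claim_exact_maxSubsequence
  intro nums k _ hD heq
  obtain ⟨hd1, hd2⟩ := hD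
  have hn1 : 1 ≤ nums.length := by omega
  have hB : maxSubsequence_alt nums k = nums := by
    unfold maxSubsequence_alt
    rw [if_neg (by omega : ¬ k ≤ 0), if_pos (by omega : (nums.length : Int) ≤ k)]
  rw [hB, pvA_eq_sel] at heq
  set s := PySem.List.sorted nums (fun x => x) false with hs
  have hslen : s.length = nums.length := PySem.List.length_sorted nums (fun x => x) false
  have hperm : s.Perm nums := PySem.List.sorted_perm nums (fun x => x) false
  have hs0 : 0 < s.length := by omega
  set x0 := s[0]'hs0 with hx0
  have hx0mem : x0 ∈ nums := hperm.subset (by exact List.getElem_mem hs0)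
  have hbound := pvSel_self_bound (pvCntA nums k) nums [] heq x0 hx0mem
  simp only [List.count_nil, Nat.zero_add] at hbound
  have hm : PySem.List.clampIdx nums.length ((nums.length : Int) - k) =
      (2 * nums.length : Int).toNat - k.toNat := by
    unfold PySem.List.clampIdx; split_ifs <;> omega
  set m := (2 * nums.length : Int).toNat - k.toNat with hmdef
  have hm1 : 1 ≤ m := by omega
  have htake1 : 1 ≤ (s.take m).count x0 := by
    have hlt : 0 < (s.take m).length := by
      rw [List.length_take]; omega
    have hx : (s.take m)[0]'hlt = x0 := by
      rw [List.getElem_take]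
    have hmem : x0 ∈ s.take m := by
      rw [← hx]; exact List.getElem_mem hlt
    exact List.count_pos_iff.mpr hmem
  have hsumc : s.count x0 = (s.take m).count x0 + (s.drop m).count x0 := by
    rw [← List.count_append, List.take_append_drop]
  have hxA : pvCntA nums k x0 = (s.drop m).count x0 := by
    rw [pvCntA_drop, hm]
  rw [hxA] at hbound
  rw [← hperm.count_eq x0] at hbound
  omega
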